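-- pv_equiv track=rewrite | github.com/YagoRizzetti/AlgoritmosYEstructurasDeDatos1 | SegundoParcial/ultimapractica.py | controld
-- ===== SOURCE A (Python) =====
-- def esDigito(x):
--     digitos = "1234567890"
--     esd = False
--     if x in digitos:
--         esd = True
--     return esd
--
-- def controld(x):
--     countd = 0
--     countpcdp = 0
--     for i in x:
--         if i == " " or i == ".":
--             if countd > 0:
--                 if countd % 2 == 0 :
--                     countpcdp += 1
--                 countd = 0
--         else:
--             esd = esDigito(i)
--             if esd:
--                 countd += 1
--
--     return countpcdp
-- ===== SOURCE B (Python) =====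
-- def controld(x):
--     def even_digit_count(seg):
--         d = sum(1 for c in seg if c in "1234567890")
--         return d > 0 and d % 2 == 0
--     segments = x.replace(".", " ").split(" ")
--     return sum(1 for seg in segments[:-1] if even_digit_count(seg))
-- ===== Notes on version B (the rewrite author's own statement) =====
-- stated objective: idiomatic
-- what changed: Replaces A's stateful per-character scan (run counter flushed at each separator) by a two-phase tokenize-then-tally pass: normalize periods to spaces, split into tokens, drop the unterminated last token, and count tokens whose digit count is positive and even; the per-character work moves into C-level str methods.
import Mathlib
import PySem

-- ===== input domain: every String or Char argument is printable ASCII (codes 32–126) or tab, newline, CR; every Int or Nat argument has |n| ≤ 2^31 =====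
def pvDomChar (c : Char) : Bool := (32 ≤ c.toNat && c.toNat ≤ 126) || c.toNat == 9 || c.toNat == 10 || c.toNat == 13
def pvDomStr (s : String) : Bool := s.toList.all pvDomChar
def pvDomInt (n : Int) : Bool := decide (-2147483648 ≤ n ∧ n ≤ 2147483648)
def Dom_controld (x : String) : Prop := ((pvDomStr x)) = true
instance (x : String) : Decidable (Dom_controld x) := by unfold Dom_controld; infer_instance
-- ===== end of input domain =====

-- B tokenizes (replace '.' by ' ', split on ' ', drop the unterminated last token) instead of A's stateful char scan; objective: idiomatic.

-- ===== PORT A =====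
def esDigito (c : Char) : Bool :=
  let digitos := "1234567890".toList
  let esd := false
  if digitos.contains c then true else esd

def controldLoop : List Char → Int → Int → Int
  | [], _, countpcdp => countpcdp
  | c :: rest, countd, countpcdp =>
    if c = ' ' ∨ c = '.' then
      if countd > 0 then
        if PySem.Int.mod countd 2 = 0 then controldLoop rest 0 (countpcdp + 1)
        else controldLoop rest 0 countpcdp
      else controldLoop rest countd countpcdp
    else
      if esDigito c then controldLoop rest (countd + 1) countpcdp
      else controldLoop rest countd countpcdp

def controld (x : String) : Int := controldLoop x.toList 0 0

-- ===== PORT B =====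
def evenDigitCount (seg : List Char) : Bool :=
  let d := (seg.filter (fun c => "1234567890".toList.contains c)).length
  decide (d > 0) && d % 2 == 0

def controld_alt (x : String) : Int :=
  -- replace('.', ' ') and split(' ') ported by the corresponding Lean list functions
  let segments := (x.toList.map (fun c => if c = '.' then ' ' else c)).splitOn ' '
  (segments.dropLast.countP evenDigitCount : Int)

-- ===== PRECONDITION & SPEC =====
def Spec_controld (x : String) (out : Int) : Prop := out = controld_alt x
instance (x : String) (out : Int) : Decidable (Spec_controld x out) := by unfold Spec_controld; infer_instance

-- ===== CLAIM (what is proved, stated in full; the proofs are below) =====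
def Claim_equal_controld : Prop := ∀ (x : String), Dom_controld x → Spec_controld x (controld x)

-- ===== LEMMAS AND PROOFS =====

-- count of terminated segments, with `carry` digits already seen in the first (open) segment
def countTerm : List (List Char) → Int → Int
  | [], _ => 0
  | [_], _ => 0
  | s :: rest, carry =>
    (if carry + ((s.filter (fun c => "1234567890".toList.contains c)).length : Int) > 0 ∧
        (carry + ((s.filter (fun c => "1234567890".toList.contains c)).length : Int)) % 2 = 0
     then 1 else 0) + countTerm rest 0

def sepP (c : Char) : Bool := c = ' ' ∨ c = '.'

lemma splitOn_map_eq_splitOnP (l : List Char) :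
    (l.map (fun c => if c = '.' then ' ' else c)).splitOn ' ' = l.splitOnP sepP := by
  show ((l.map (fun c => if c = '.' then ' ' else c)).splitOnP (· == ' ')) = l.splitOnP sepP
  induction l with
  | nil => simp [List.splitOnP_nil]
  | cons c t ih =>
    simp only [List.map_cons, List.splitOnP_cons, ih]
    by_cases h : sepP c
    · have h' : ((if c = '.' then ' ' else c) == ' ') = true := by
        simp only [sepP, decide_eq_true_eq] at h
        rcases h with h | h <;> simp [h]
      simp [h, h']
    · have hne : ¬ (c = ' ' ∨ c = '.') := by simpa [sepP] using h
      have hdot : c ≠ '.' := fun hh => hne (Or.inr hh)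
      have hsp : c ≠ ' ' := fun hh => hne (Or.inl hh)
      have h' : ((if c = '.' then ' ' else c) == ' ') = false := by
        simp [hdot, hsp]
      simp [h, hdot, hsp]

lemma countTerm_modifyHead (S : List (List Char)) (hS : S ≠ []) (c : Char) (countd : Int) :
    countTerm (S.modifyHead (List.cons c)) countd
      = countTerm S (countd + if "1234567890".toList.contains c then 1 else 0) := by
  match S with
  | [s] => simp [countTerm]
  | s :: s' :: t =>
    simp only [List.modifyHead, countTerm, List.filter_cons]
    by_cases h : "1234567890".toList.contains c
    · simp only [h, if_true]
      congr 2
      exact propext (by push_cast [List.length_cons]; omega)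
    · rw [if_neg h, if_neg h, add_zero]

lemma loop_eq_countTerm (l : List Char) (countd acc : Int) (hnn : 0 ≤ countd) :
    controldLoop l countd acc = acc + countTerm (l.splitOnP sepP) countd := by
  induction l generalizing countd acc with
  | nil => simp [controldLoop, List.splitOnP_nil, countTerm]
  | cons c t ih =>
    rw [List.splitOnP_cons]
    by_cases h : (c = ' ' ∨ c = '.')
    · have hsep : sepP c = true := by simp [sepP, h]
      rw [controldLoop, if_pos h, hsep, if_pos rfl]
      have hCT : countTerm ([] :: t.splitOnP sepP) countd
          = (if countd > 0 ∧ countd % 2 = 0 then 1 else 0) + countTerm (t.splitOnP sepP) 0 := by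
        rcases hS : t.splitOnP sepP with _ | ⟨s, S'⟩
        · exact absurd hS (List.splitOnP_ne_nil _ _)
        · simp [countTerm]
      by_cases hpos : countd > 0
      · have hmod : PySem.Int.mod countd 2 = countd % 2 := by
          simp [PySem.Int.mod, Int.fmod_eq_emod_of_nonneg _ (by norm_num : (0:Int) ≤ 2)]
        by_cases hev : countd % 2 = 0
        · rw [if_pos hpos, hmod, if_pos hev, ih _ _ le_rfl, hCT, if_pos ⟨hpos, hev⟩]; ring
        · rw [if_pos hpos, hmod, if_neg hev, ih _ _ le_rfl, hCT,
            if_neg (by intro hc; exact hev hc.2)]; ring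
      · have h0 : countd = 0 := by omega
        subst h0
        rw [if_neg hpos, ih _ _ le_rfl, hCT, if_neg (by intro hc; exact hpos hc.1), zero_add]
    · have hsep : sepP c = false := by
        have hne : ¬ (c = ' ' ∨ c = '.') := h
        simp [sepP, hne]
      rw [controldLoop, if_neg h, hsep]
      have hdig : esDigito c = (("1234567890".toList.contains c) : Bool) := by
        simp [esDigito]
      by_cases hd : "1234567890".toList.contains c
      · rw [hdig, hd, if_pos rfl]
        simp only [Bool.false_eq_true, if_false]
        rw [ih _ _ (by omega), countTerm_modifyHead _ (List.splitOnP_ne_nil _ _), if_pos hd]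
      · rw [hdig, if_neg (by simpa using hd)]
        simp only [Bool.false_eq_true, if_false]
        rw [ih _ _ hnn, countTerm_modifyHead _ (List.splitOnP_ne_nil _ _), if_neg hd, add_zero]

lemma countTerm_zero_eq_countP (S : List (List Char)) :
    countTerm S 0 = (S.dropLast.countP evenDigitCount : Int) := by
  induction S with
  | nil => simp [countTerm]
  | cons s t ih =>
    rcases t with _ | ⟨s', t'⟩
    · simp [countTerm]
    · simp only [countTerm]
      rw [ih, List.dropLast_cons₂, List.countP_cons]
      have hiff : (evenDigitCount s = true) ↔
          ((0:Int) + (((s.filter (fun c => "1234567890".toList.contains c)).length : Int)) > 0 ∧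
           ((0:Int) + ((s.filter (fun c => "1234567890".toList.contains c)).length : Int)) % 2 = 0) := by
        simp only [evenDigitCount, Bool.and_eq_true, decide_eq_true_eq, beq_iff_eq, zero_add]
        constructor
        · rintro ⟨h1, h2⟩; constructor <;> omega
        · rintro ⟨h1, h2⟩; constructor <;> omega
      by_cases hP : evenDigitCount s = true
      · rw [if_pos (hiff.mp hP), hP]
        simp
        omega
      · rw [if_neg (fun hc => hP (hiff.mpr hc))]
        simp only [Bool.not_eq_true] at hP
        rw [hP]
        simp

-- ===== VERDICT (by name: the statement is the Claim_ definition above) =====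
theorem controld_spec : Claim_equal_controld := by
  intro x _
  unfold Spec_controld controld controld_alt
  rw [splitOn_map_eq_splitOnP, loop_eq_countTerm _ _ _ le_rfl, countTerm_zero_eq_countP]
  simp
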